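-- pv_equiv track=rewrite | github.com/dunnoconnor/advent_of_code_2022 | day3/p3a.py | sumString
-- ===== SOURCE A (Python) =====
-- def sumString(string):
--     sum = 0
--     # for uppercase/lowercase, offset from unicode value
--     for c in string:
--         if c.isupper():
--             sum += (ord(c) - 38)
--         else:
--             sum += (ord(c) - 96)
--     return sum
-- ===== SOURCE B (Python) =====
-- def sumString(string):
--     # aggregates + closed-form combination: offsets 96 (default) and 38 (upper) differ by 58
--     total = sum(ord(c) for c in string)
--     u = sum(1 for c in string if c.isupper())
--     return total - 96 * len(string) + 58 * u
-- ===== Notes on version B (the rewrite author's own statement) =====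
-- stated objective: alternative
-- what changed: Replaced the per-character if/else accumulation by three aggregates (sum of ord, length, uppercase count) combined with the closed-form total - 96*n + 58*u.
import Mathlib
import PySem

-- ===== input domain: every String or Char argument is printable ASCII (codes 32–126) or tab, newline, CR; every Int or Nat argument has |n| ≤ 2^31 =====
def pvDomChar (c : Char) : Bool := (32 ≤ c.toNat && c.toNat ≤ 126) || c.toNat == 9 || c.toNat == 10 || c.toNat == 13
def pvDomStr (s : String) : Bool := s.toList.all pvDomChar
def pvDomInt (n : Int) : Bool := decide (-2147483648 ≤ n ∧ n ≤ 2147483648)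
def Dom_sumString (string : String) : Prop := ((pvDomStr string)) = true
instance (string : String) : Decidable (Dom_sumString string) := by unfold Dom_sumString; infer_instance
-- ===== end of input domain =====

-- B rewrites the per-character branch as aggregate passes combined with a closed-form expression (alternative decomposition).

-- ===== PORT A =====
def sumString (string : String) : Int :=
  string.toList.foldl
    (fun sum c =>
      if PySem.Chars.isupper c then sum + ((c.toNat : Int) - 38)
      else sum + ((c.toNat : Int) - 96))
    0

-- ===== PORT B =====
def sumString_alt (string : String) : Int :=
  let cs := string.toList
  let total : Int := (cs.map (fun c => (c.toNat : Int))).sum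
  let u : Int := (cs.countP (fun c => PySem.Chars.isupper c) : Nat)
  total - 96 * (cs.length : Int) + 58 * u

-- ===== PRECONDITION & SPEC =====
def Spec_sumString (string : String) (out : Int) : Prop := out = sumString_alt string
instance (string : String) (out : Int) : Decidable (Spec_sumString string out) := by unfold Spec_sumString; infer_instance

-- ===== CLAIM (what is proved, stated in full; the proofs are below) =====
def Claim_equal_sumString : Prop := ∀ (string : String), Dom_sumString string → Spec_sumString string (sumString string)

-- ===== LEMMAS AND PROOFS =====
theorem sumString_list (cs : List Char) (a : Int) :
    cs.foldl
      (fun sum c =>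
        if PySem.Chars.isupper c then sum + ((c.toNat : Int) - 38)
        else sum + ((c.toNat : Int) - 96))
      a
    = a + (cs.map (fun c => (c.toNat : Int))).sum - 96 * (cs.length : Int)
        + 58 * ((cs.countP (fun c => PySem.Chars.isupper c) : Nat) : Int) := by
  induction cs generalizing a with
  | nil => simp
  | cons c cs ih =>
    simp only [List.foldl_cons, List.map_cons, List.sum_cons, List.length_cons, List.countP_cons]
    by_cases h : PySem.Chars.isupper c = true <;> simp [h, ih] <;> ring

-- ===== VERDICT (by name: the statement is the Claim_ definition above) =====
theorem sumString_spec : Claim_equal_sumString := by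
  intro s _
  unfold Spec_sumString sumString sumString_alt
  rw [sumString_list]
  ring
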